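-- pv_equiv track=rewrite | github.com/gabits/training | sum_consecutive_equal_integers/sum_consecutive_equal_integers.py | sum_consecutive_integers
-- ===== SOURCE A (Python) =====
-- def sum_consecutive_integers(o_list):
--     new_list = [o_list[0]]
--     for i in range(1, len(o_list)):
--         if o_list[i] == o_list[i - 1]:
--             new_list[len(new_list) - 1] += o_list[i]
--         else:
--             new_list.append(o_list[i])
--     return new_list
-- ===== SOURCE B (Python) =====
-- def sum_consecutive_integers(o_list):
--     out = []
--     i = 0
--     n = len(o_list)
--     while i < n:
--         v = o_list[i]
--         j = i + 1
--         while j < n and o_list[j] == v: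
--             j += 1
--         out.append(v * (j - i))
--         i = j
--     return out
-- ===== Notes on version B (the rewrite author's own statement) =====
-- stated objective: alternative
-- what changed: Replaces A's append-or-mutate-last accumulator pass with a two-pointer scan that finds each maximal run of equal values and emits value * run_length per run.
-- outside the precondition, e.g. on sum_consecutive_integers([]): A raises IndexError, B returns []
import Mathlib
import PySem

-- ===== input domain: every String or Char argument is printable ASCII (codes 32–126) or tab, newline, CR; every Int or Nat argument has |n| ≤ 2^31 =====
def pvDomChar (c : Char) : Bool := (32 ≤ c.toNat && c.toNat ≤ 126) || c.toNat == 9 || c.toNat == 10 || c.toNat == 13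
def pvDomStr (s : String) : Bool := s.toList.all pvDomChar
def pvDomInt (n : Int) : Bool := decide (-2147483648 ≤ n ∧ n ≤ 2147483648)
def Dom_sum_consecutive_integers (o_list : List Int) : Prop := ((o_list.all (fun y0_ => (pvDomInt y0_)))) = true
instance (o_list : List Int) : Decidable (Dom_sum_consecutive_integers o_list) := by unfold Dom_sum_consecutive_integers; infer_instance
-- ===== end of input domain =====

-- B replaces A's append-or-mutate-last accumulator pass by a two-pointer scan over maximal
-- runs, emitting value * run-length per run (objective: alternative; return value only).

-- ===== PORT A =====
-- loop body of A: 'if o_list[i] == o_list[i-1]: new_list[len(new_list)-1] += o_list[i] else: new_list.append(o_list[i])'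
def stepA (l : List Int) (new_list : List Int) (i : Int) : List Int :=
  if PySem.List.pyGetD l i 0 = PySem.List.pyGetD l (i - 1) 0 then
    PySem.List.pySetD new_list ((new_list.length : Int) - 1)
      (PySem.List.pyGetD new_list ((new_list.length : Int) - 1) 0 + PySem.List.pyGetD l i 0)
  else
    new_list ++ [PySem.List.pyGetD l i 0]

-- indices are always in range: Pre_ excludes the empty list (o_list[0] raises there)
def sum_consecutive_integers (o_list : List Int) : List Int :=
  (PySem.List.pyRange 1 (o_list.length : Int) 1).foldl (stepA o_list)
    [PySem.List.pyGetD o_list 0 0]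

-- ===== PORT B =====
-- inner while: 'while j < n and o_list[j] == v: j += 1'
def runEndB (l : List Int) (v : Int) (j : Nat) : Nat :=
  if _h : j < l.length ∧ l.getD j 0 = v then runEndB l v (j + 1) else j
termination_by l.length - j
decreasing_by omega

theorem le_runEndB (l : List Int) (v : Int) (j : Nat) : j ≤ runEndB l v j := by
  rw [runEndB]
  split
  · have := le_runEndB l v (j + 1); omega
  · exact Nat.le_refl j
termination_by l.length - j
decreasing_by rename_i h; omega

-- outer while: 'while i < n: v = o_list[i]; j = i+1; …; out.append(v * (j - i)); i = j'
def outerB (l : List Int) (i : Nat) (out : List Int) : List Int :=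
  if _h : i < l.length then
    let v := l.getD i 0
    let j := runEndB l v (i + 1)
    outerB l j (out ++ [v * ((j : Int) - (i : Int))])
  else out
termination_by l.length - i
decreasing_by have := le_runEndB l (l.getD i 0) (i + 1); omega

def sum_consecutive_integers_alt (o_list : List Int) : List Int :=
  outerB o_list 0 []

-- ===== PRECONDITION & SPEC =====
-- Pre_ excludes only the empty list, on which A raises IndexError (reading o_list[0]); B returns [] there.
def Pre_sum_consecutive_integers (o_list : List Int) : Prop := o_list ≠ []
instance (o_list : List Int) : Decidable (Pre_sum_consecutive_integers o_list) := by
  unfold Pre_sum_consecutive_integers; infer_instance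

def pvWitness_sum_consecutive_integers : List Int := [1, 1, 2]

def Spec_sum_consecutive_integers (o_list : List Int) (out : List Int) : Prop :=
  out = sum_consecutive_integers_alt o_list
instance (o_list : List Int) (out : List Int) : Decidable (Spec_sum_consecutive_integers o_list out) := by
  unfold Spec_sum_consecutive_integers; infer_instance

-- ===== CLAIM (what is proved, stated in full; the proofs are below) =====
def Claim_equal_sum_consecutive_integers : Prop := ∀ (o_list : List Int), Dom_sum_consecutive_integers o_list → Pre_sum_consecutive_integers o_list → Spec_sum_consecutive_integers o_list (sum_consecutive_integers o_list)

-- ===== LEMMAS AND PROOFS =====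

-- common reference shape: the merged list, one entry per maximal run
def msum : List Int → List Int
  | [] => []
  | x :: xs =>
    x * (1 + ((xs.takeWhile (· = x)).length : Int)) :: msum (xs.dropWhile (· = x))
termination_by l => l.length
decreasing_by simpa using Nat.lt_succ_of_le (List.length_dropWhile_le _ _)

-- A's loop as element-wise recursion: prev = previous original element, s = current run sum
def mrg (prev s : Int) : List Int → List Int
  | [] => [s]
  | x :: xs => if x = prev then mrg x (s + x) xs else s :: mrg x x xs

theorem runEndB_eq (l : List Int) (v : Int) :
    ∀ (ys : List Int) (j : Nat), l.drop j = ys →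
      runEndB l v j = j + (ys.takeWhile (· = v)).length ∧
      l.drop (runEndB l v j) = ys.dropWhile (· = v) := by
  intro ys
  induction ys with
  | nil =>
    intro j h
    have hlen : l.length ≤ j := by
      have := congrArg List.length h; simp at this; omega
    have hc : ¬ (j < l.length ∧ l.getD j 0 = v) := fun hcon => absurd hcon.1 (by omega)
    rw [runEndB, dif_neg hc]
    exact ⟨by simp, by simp [h]⟩
  | cons y ys ih =>
    intro j h
    have hj : j < l.length := by
      by_contra hge
      rw [List.drop_eq_nil_of_le (by omega)] at h; exact absurd h (by simp)
    have hget : l.getD j 0 = y := by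
      have h0 : (l.drop j)[0]? = some y := by rw [h]; rfl
      have : l[j]? = some y := by simpa using h0
      simp [List.getD, this]
    have hdrop : l.drop (j + 1) = ys := by
      have := congrArg List.tail h
      simpa [List.tail_drop] using this
    by_cases hv : y = v
    · rw [runEndB]
      have hc : j < l.length ∧ l.getD j 0 = v := ⟨hj, by rw [hget, hv]⟩
      rw [dif_pos hc]
      obtain ⟨h1, h2⟩ := ih (j + 1) hdrop
      refine ⟨?_, ?_⟩
      · rw [h1]; simp [List.takeWhile, hv]; omega
      · rw [h2]; simp [List.dropWhile, hv]
    · rw [runEndB]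
      have hc : ¬ (j < l.length ∧ l.getD j 0 = v) := by
        intro hcon; exact hv (by rw [← hget, hcon.2])
      rw [dif_neg hc]
      constructor
      · simp [List.takeWhile, hv]
      · rw [h]; simp [List.dropWhile, hv]

theorem outerB_msum (l : List Int) :
    ∀ (fuel i : Nat) (out : List Int), l.length - i ≤ fuel →
      outerB l i out = out ++ msum (l.drop i) := by
  intro fuel
  induction fuel with
  | zero =>
    intro i out hf
    rw [outerB]
    have hge : ¬ i < l.length := by omega
    rw [dif_neg hge, List.drop_eq_nil_of_le (by omega)]
    simp [msum]
  | succ fuel ih =>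
    intro i out hf
    rw [outerB]
    by_cases hi : i < l.length
    · rw [dif_pos hi]
      set v := l.getD i 0 with hv
      have hdropi : l.drop i = v :: l.drop (i + 1) := by
        have hsome : l[i]? = some v := by
          simp [hv, List.getD, List.getElem?_eq_getElem hi]
        rw [List.drop_eq_getElem_cons hi]
        simp [hv, List.getD, List.getElem?_eq_getElem hi]
      obtain ⟨h1, h2⟩ := runEndB_eq l v (l.drop (i + 1)) (i + 1) rfl
      set j := runEndB l v (i + 1) with hj
      have hij : i + 1 ≤ j := le_runEndB l v (i + 1)
      have hjlen : j ≤ l.length := by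
        by_contra hgt
        have : l.drop j = [] := List.drop_eq_nil_of_le (by omega)
        rw [this] at h2
        have htw : ((l.drop (i+1)).takeWhile (· = v)).length ≤ (l.drop (i+1)).length :=
          (List.takeWhile_prefix _).length_le
        have hlen1 : (l.drop (i+1)).length = l.length - (i+1) := by simp
        omega
      rw [ih j (out ++ [v * ((j : Int) - (i : Int))]) (by omega)]
      rw [hdropi, msum, h2]
      have hcount : (j : Int) - (i : Int) =
          1 + (((l.drop (i + 1)).takeWhile (· = v)).length : Int) := by
        rw [h1] at *; push_cast; omega
      rw [List.append_assoc]
      simp [hcount]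
    · rw [dif_neg hi, List.drop_eq_nil_of_le (by omega)]
      simp [msum]

theorem mrg_msum : ∀ (xs : List Int) (v s : Int),
    mrg v s xs = (s + v * ((xs.takeWhile (· = v)).length : Int)) :: msum (xs.dropWhile (· = v)) := by
  intro xs
  induction xs with
  | nil => intro v s; simp [mrg, msum]
  | cons y ys ih =>
    intro v s
    by_cases hv : y = v
    · rw [mrg]
      rw [if_pos hv, hv, ih v (s + v)]
      simp [List.takeWhile, List.dropWhile]
      ring
    · rw [mrg, if_neg hv]
      rw [ih y y]
      simp [List.takeWhile, List.dropWhile, hv, msum]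
      ring

theorem loopA (l : List Int) :
    ∀ (xs : List Int) (k : Nat), l.drop k = xs → 1 ≤ k →
      ∀ (prev s : Int) (pre : List Int), l.getD (k - 1) 0 = prev →
        (PySem.List.pyRange (k : Int) (l.length : Int) 1).foldl (stepA l) (pre ++ [s]) =
          pre ++ mrg prev s xs := by
  intro xs
  induction xs with
  | nil =>
    intro k h hk prev s pre hprev
    have hlen : l.length ≤ k := by
      have := congrArg List.length h; simp at this; omega
    rw [PySem.List.pyRange_one_eq_nil (by exact_mod_cast hlen)]
    simp [mrg]
  | cons x xs ih =>
    intro k h hk prev s pre hprev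
    have hkl : k < l.length := by
      by_contra hge
      rw [List.drop_eq_nil_of_le (by omega)] at h; exact absurd h (by simp)
    have hget : l.getD k 0 = x := by
      have h0 : (l.drop k)[0]? = some x := by rw [h]; rfl
      have : l[k]? = some x := by simpa using h0
      simp [List.getD, this]
    have hdrop : l.drop (k + 1) = xs := by
      have := congrArg List.tail h
      simpa [List.tail_drop] using this
    rw [PySem.List.pyRange_one_cons (by exact_mod_cast hkl), List.foldl_cons]
    have hstep_get_i : PySem.List.pyGetD l (k : Int) 0 = x := by
      rw [PySem.List.pyGetD_natCast]; exact hget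
    have hcast : (k : Int) - 1 = ((k - 1 : Nat) : Int) := by push_cast [hk]; ring
    have hstep_get_im1 : PySem.List.pyGetD l ((k : Int) - 1) 0 = prev := by
      rw [hcast, PySem.List.pyGetD_natCast]; exact hprev
    by_cases heq : x = prev
    · have hstep : stepA l (pre ++ [s]) (k : Int) = pre ++ [s + x] := by
        rw [stepA, if_pos (by rw [hstep_get_i, hstep_get_im1, heq])]
        have hlenacc : ((pre ++ [s]).length : Int) - 1 = ((pre.length : Nat) : Int) := by
          simp
        rw [hlenacc, PySem.List.pyGetD_natCast, PySem.List.pySetD_natCast, hstep_get_i]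
        simp
      rw [hstep]
      rw [show ((k : Int) + 1) = ((k + 1 : Nat) : Int) by push_cast; ring]
      rw [ih (k + 1) hdrop (by omega) x (s + x) pre (by simpa [List.getD] using hget)]
      rw [mrg, if_pos heq, heq]
    · have hstep : stepA l (pre ++ [s]) (k : Int) = (pre ++ [s]) ++ [x] := by
        rw [stepA, if_neg (by rw [hstep_get_i, hstep_get_im1]; exact heq), hstep_get_i]
      rw [hstep]
      rw [show ((k : Int) + 1) = ((k + 1 : Nat) : Int) by push_cast; ring]
      rw [ih (k + 1) hdrop (by omega) x x (pre ++ [s]) (by simpa [List.getD] using hget)]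
      rw [mrg, if_neg heq]
      simp

-- ===== VERDICT (by name: the statement is the Claim_ definition above) =====
theorem sum_consecutive_integers_spec : Claim_equal_sum_consecutive_integers := by
  intro o_list _hdom hpre
  unfold Spec_sum_consecutive_integers
  match o_list, hpre with
  | x :: xs, _ =>
    rw [sum_consecutive_integers_alt, outerB_msum (x :: xs) (x :: xs).length 0 [] (by omega)]
    rw [sum_consecutive_integers]
    have hinit : [PySem.List.pyGetD (x :: xs) 0 0] = ([] : List Int) ++ [x] := by
      simp [PySem.List.pyGetD_zero_cons]
    rw [hinit]
    have hl := loopA (x :: xs) xs 1 (by simp) (by omega) x x [] (by simp)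
    push_cast at hl
    rw [hl, mrg_msum]
    simp [msum]
    ring
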